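-- pv_equiv track=rewrite | github.com/linhnt31/Python | Competitive Progamming/CodeSignal/Tourements/29_04_2019.py | isSumOfConsecutive
-- ===== SOURCE A (Python) =====
-- def isSumOfConsecutive(n):
--     for start in range(1, n):
--         number = n
--         subtrahend = start
--         while number > 0:
--             number -= subtrahend
--             subtrahend += 1
--         if number == 0:
--             return True
--     return False
-- ===== SOURCE B (Python) =====
-- def isSumOfConsecutive(n):
--     # n is a sum of >=2 consecutive positive integers iff n > 2 and n is not a power of two
--     return n > 2 and (n & (n - 1)) != 0
-- ===== Notes on version B (the rewrite author's own statement) =====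
-- stated objective: faster
-- what changed: Replaced the trial loop over every start with subtraction inner loops by the closed-form bit test 'n > 2 and n is not a power of two' (n & (n-1) != 0).
import Mathlib
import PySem

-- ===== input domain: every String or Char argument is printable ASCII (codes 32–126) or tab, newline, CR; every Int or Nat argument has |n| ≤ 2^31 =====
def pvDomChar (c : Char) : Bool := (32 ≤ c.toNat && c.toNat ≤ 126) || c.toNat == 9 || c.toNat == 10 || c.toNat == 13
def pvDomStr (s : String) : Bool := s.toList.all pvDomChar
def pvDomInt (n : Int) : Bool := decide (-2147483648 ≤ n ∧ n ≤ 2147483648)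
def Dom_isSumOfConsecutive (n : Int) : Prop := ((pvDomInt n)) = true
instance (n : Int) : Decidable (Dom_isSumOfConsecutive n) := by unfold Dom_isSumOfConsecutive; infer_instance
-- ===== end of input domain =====

-- B replaces A's trial loop over start values by the closed-form bit test
-- "n > 2 and n is not a power of two".

-- ===== PORT A =====
-- the inner 'while number > 0' loop; the '0 < subtrahend' conjunct only makes the
-- recursion total (A always calls it with subtrahend = start ≥ 1)
def pvInner (number subtrahend : Int) : Int :=
  if _h : 0 < number ∧ 0 < subtrahend then
    pvInner (number - subtrahend) (subtrahend + 1)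
  else number
termination_by number.toNat
decreasing_by omega

-- the 'for start in range(1, n)' loop with its early 'return True'
def pvOuter (n start : Int) : Bool :=
  if _h : start < n then
    if pvInner n start = 0 then true else pvOuter n (start + 1)
  else false
termination_by (n - start).toNat
decreasing_by omega

def isSumOfConsecutive (n : Int) : Bool := pvOuter n 1

-- ===== PORT B =====
def isSumOfConsecutive_alt (n : Int) : Bool := decide (2 < n) && (Int.land n (n - 1) != 0)

-- ===== PRECONDITION & SPEC =====
def Spec_isSumOfConsecutive (n : Int) (out : Bool) : Prop := out = isSumOfConsecutive_alt n
instance (n : Int) (out : Bool) : Decidable (Spec_isSumOfConsecutive n out) := by unfold Spec_isSumOfConsecutive; infer_instance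

-- ===== CLAIM (what is proved, stated in full; the proofs are below) =====
def Claim_equal_isSumOfConsecutive : Prop := ∀ (n : Int), Dom_isSumOfConsecutive n → Spec_isSumOfConsecutive n (isSumOfConsecutive n)

-- ===== LEMMAS AND PROOFS =====

-- the inner loop ends at exactly 0 iff n is s + (s+1) + ... (j terms, j ≥ 0)
theorem pvInner_zero_iff (n s : Int) (hs : 0 < s) :
    pvInner n s = 0 ↔ ∃ j : ℕ, 2 * n = 2 * (j : Int) * s + (j : Int) * ((j : Int) - 1) := by
  constructor
  · induction n, s using pvInner.induct with
    | case1 n s h ih =>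
      rw [pvInner]
      simp only [h]
      intro hz
      obtain ⟨j, hj⟩ := ih (by omega) hz
      exact ⟨j + 1, by push_cast; linear_combination hj⟩
    | case2 n s h =>
      rw [pvInner]
      simp only [h]
      intro hz
      simp at hz
      exact ⟨0, by simp [hz]⟩
  · rintro ⟨j, hj⟩
    induction j generalizing n s with
    | zero =>
      have hn : n = 0 := by simpa using hj
      rw [pvInner]
      simp [hn]
    | succ j ih =>
      push_cast at hj
      have hjs : 0 ≤ (j : Int) * s := by positivity
      have hjj : 0 ≤ (j : Int) * ((j : Int) + 1) := by positivity
      have hn : 0 < n := by nlinarith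
      rw [pvInner]
      simp only [hn, hs, and_self, dite_true]
      exact ih (n - s) (s + 1) (by omega) (by linear_combination hj)

-- the outer loop returns true iff some start in [s, n) makes the inner loop hit 0
theorem pvOuter_iff (n s : Int) :
    pvOuter n s = true ↔ ∃ t : Int, s ≤ t ∧ t < n ∧ pvInner n t = 0 := by
  induction s using pvOuter.induct (n := n)
  next s h hz =>
    rw [pvOuter]
    simp only [h, dite_true, hz, if_true, true_iff]
    exact ⟨s, le_refl s, h, hz⟩
  next s h hz ih =>
    rw [pvOuter]
    simp only [h, dite_true, hz, if_false]
    rw [ih]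
    constructor
    · rintro ⟨t, ht1, ht2, ht3⟩; exact ⟨t, by omega, ht2, ht3⟩
    · rintro ⟨t, ht1, ht2, ht3⟩
      refine ⟨t, ?_, ht2, ht3⟩
      rcases eq_or_lt_of_le ht1 with rfl | h'
      · exact absurd ht3 hz
      · omega
  next s h =>
    rw [pvOuter]
    simp only [h, dite_false]
    constructor
    · intro hx; exact absurd hx (by simp)
    · rintro ⟨t, ht1, ht2, _⟩; exact absurd ht2 (by omega)

theorem land_two_mul_pred (m : ℕ) (hm : 0 < m) :
    (2 * m) &&& (2 * m - 1) = 2 * (m &&& (m - 1)) := by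
  have h2 : 2 * m - 1 = Nat.bit true (m - 1) := by simp [Nat.bit]; omega
  have h1 : 2 * m = Nat.bit false m := by simp [Nat.bit]
  rw [h2, h1, Nat.land_bit]
  simp [Nat.bit]

theorem land_odd_pred (m : ℕ) : (2 * m + 1) &&& (2 * m) = 2 * m := by
  have h1 : 2 * m + 1 = Nat.bit true m := by simp [Nat.bit]
  have h2 : 2 * m = Nat.bit false m := by simp [Nat.bit]
  conv_lhs => rw [h1, h2, Nat.land_bit]
  simp [Nat.bit]

-- n & (n-1) == 0 detects powers of two
theorem land_pred_eq_zero_iff (n : ℕ) (hn : 0 < n) :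
    (n &&& (n - 1) = 0) ↔ ∃ k : ℕ, n = 2 ^ k := by
  induction n using Nat.strong_induction_on with
  | _ n ih =>
  rcases Nat.even_or_odd n with ⟨m, hm⟩ | ⟨m, hm⟩
  · have hm0 : 0 < m := by omega
    have hrec := ih m (by omega) hm0
    have h2m : n = 2 * m := by omega
    rw [h2m, land_two_mul_pred m hm0]
    constructor
    · intro h
      obtain ⟨k, hk⟩ := hrec.mp (by omega)
      exact ⟨k + 1, by rw [hk]; ring⟩
    · rintro ⟨k, hk⟩
      rcases k with _ | k
      · omega
      · have hps := pow_succ 2 k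
        have : m = 2 ^ k := by omega
        have := hrec.mpr ⟨k, this⟩
        omega
  · rcases Nat.eq_zero_or_pos m with rfl | hm0
    · simp only [show n = 1 by omega]
      exact ⟨fun _ => ⟨0, rfl⟩, fun _ => by decide⟩
    · have h2m : n = 2 * m + 1 := by omega
      rw [h2m, show 2 * m + 1 - 1 = 2 * m from rfl, land_odd_pred]
      constructor
      · omega
      · rintro ⟨k, hk⟩
        rcases k with _ | k
        · omega
        · exfalso
          have hps := pow_succ 2 k
          have hpos : 0 < 2 ^ k := Nat.two_pow_pos k
          omega

-- an odd divisor of a power of two is 1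
theorem odd_dvd_pow_two (d k : ℕ) (hd : Odd d) (hdvd : d ∣ 2 ^ k) : d = 1 :=
  Nat.Coprime.eq_one_of_dvd ((Nat.coprime_two_right.mpr hd).pow_right k) hdvd

-- the main number-theoretic fact, over ℕ
theorem key_nat (N : ℕ) :
    (∃ T j : ℕ, 1 ≤ T ∧ T < N ∧ 2 * N = 2 * j * T + j * (j - 1)) ↔
      (2 < N ∧ ¬ ∃ k : ℕ, N = 2 ^ k) := by
  constructor
  · rintro ⟨T, j, hT1, hTN, hj⟩
    obtain ⟨j2, rfl⟩ : ∃ j2, j = j2 + 2 := by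
      rcases j with _ | _ | j2
      · exfalso; omega
      · exfalso; simp at hj; omega
      · exact ⟨j2, rfl⟩
    rw [show j2 + 2 - 1 = j2 + 1 from rfl] at hj
    have hjT : 0 ≤ j2 * T := Nat.zero_le _
    have hN3 : 2 < N := by nlinarith
    refine ⟨hN3, ?_⟩
    rintro ⟨k, rfl⟩
    have hfac : 2 * 2 ^ k = (j2 + 2) * (2 * T + j2 + 1) := by
      have hr : (j2 + 2) * (2 * T + j2 + 1) = 2 * (j2 + 2) * T + (j2 + 2) * (j2 + 1) := by ring
      omega
    have hps : 2 ^ (k + 1) = 2 ^ k * 2 := pow_succ 2 k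
    rcases Nat.even_or_odd j2 with ⟨v, hv⟩ | ⟨v, hv⟩
    · -- j even, the other factor 2T + j2 + 1 is odd and ≥ 3
      have hd : Odd (2 * T + j2 + 1) := ⟨T + v, by omega⟩
      have hdvd : (2 * T + j2 + 1) ∣ 2 ^ (k + 1) := by
        refine ⟨j2 + 2, ?_⟩
        have hc : (2 * T + j2 + 1) * (j2 + 2) = (j2 + 2) * (2 * T + j2 + 1) := by ring
        omega
      have := odd_dvd_pow_two _ (k + 1) hd hdvd
      omega
    · -- j = j2 + 2 is odd and ≥ 3
      have hd : Odd (j2 + 2) := ⟨v + 1, by omega⟩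
      have hdvd : (j2 + 2) ∣ 2 ^ (k + 1) := by
        refine ⟨2 * T + j2 + 1, ?_⟩
        omega
      have := odd_dvd_pow_two _ (k + 1) hd hdvd
      omega
  · rintro ⟨hN3, hnp⟩
    obtain ⟨a, m, hmo, hN⟩ := Nat.exists_eq_two_pow_mul_odd (n := N) (by omega)
    obtain ⟨v, hv⟩ := hmo
    have hm1 : m ≠ 1 := fun h => hnp ⟨a, by rw [hN, h, Nat.mul_one]⟩
    have hm3 : 3 ≤ m := by omega
    have hxpos : 0 < 2 ^ a := Nat.two_pow_pos a
    have hx3 : 3 * 2 ^ a ≤ 2 ^ a * m := by nlinarith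
    have hmN : m ≤ N := by rw [hN]; nlinarith
    by_cases hcase : m < 2 * 2 ^ a
    · -- j = m (the odd factor), 2T + j - 1 = 2·2^a
      obtain ⟨w, hw⟩ : ∃ w, 2 ^ a = v + w := ⟨2 ^ a - v, by omega⟩
      refine ⟨w, m, by omega, by omega, ?_⟩
      rw [hN, hw, hv, show 2 * v + 1 - 1 = 2 * v from rfl]
      ring
    · -- j = 2·2^a (the even factor), 2T + j - 1 = m
      obtain ⟨x1, hx1⟩ : ∃ x1, 2 ^ a = x1 + 1 := ⟨2 ^ a - 1, by omega⟩
      obtain ⟨u, hu⟩ : ∃ u, m + 1 = 2 * 2 ^ a + 2 * u := ⟨v + 1 - 2 ^ a, by omega⟩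
      refine ⟨u, 2 * 2 ^ a, by omega, by omega, ?_⟩
      rw [hN, show m = 2 * (x1 + 1) + 2 * u - 1 by omega, hx1]
      have e : 2 * (x1 + 1) + 2 * u - 1 = 2 * x1 + 2 * u + 1 := by omega
      rw [e, show 2 * (x1 + 1) - 1 = 2 * x1 + 1 by omega]
      ring
-- cast helper: (j : ℤ) * ((j : ℤ) - 1) = ((j * (j - 1) : ℕ) : ℤ)
theorem cast_j_mul_pred (j : ℕ) : (j : Int) * ((j : Int) - 1) = ((j * (j - 1) : ℕ) : Int) := by
  cases j with
  | zero => simp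
  | succ j' => push_cast [Nat.add_sub_cancel]; ring

-- bridge the Int-level existential of the loops to the ℕ-level fact
theorem exists_int_iff_nat (n : Int) :
    (∃ t : Int, 1 ≤ t ∧ t < n ∧ ∃ j : ℕ, 2 * n = 2 * (j : Int) * t + (j : Int) * ((j : Int) - 1)) ↔
      (∃ T j : ℕ, 1 ≤ T ∧ T < n.toNat ∧ 2 * n.toNat = 2 * j * T + j * (j - 1)) := by
  constructor
  · rintro ⟨t, ht1, htn, j, hj⟩
    refine ⟨t.toNat, j, by omega, by omega, ?_⟩
    rw [cast_j_mul_pred] at hj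
    have h1 : t = ((t.toNat : ℕ) : Int) := by omega
    have h2 : n = ((n.toNat : ℕ) : Int) := by omega
    rw [h1, h2] at hj
    exact_mod_cast hj
  · rintro ⟨T, j, hT1, hTN, hj⟩
    refine ⟨(T : Int), by omega, by omega, j, ?_⟩
    have h2 : n = ((n.toNat : ℕ) : Int) := by omega
    rw [h2, cast_j_mul_pred]
    exact_mod_cast hj

-- A's value characterised
theorem portA_iff (n : Int) :
    isSumOfConsecutive n = true ↔ (2 < n.toNat ∧ ¬ ∃ k : ℕ, n.toNat = 2 ^ k) := by
  unfold isSumOfConsecutive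
  rw [pvOuter_iff]
  have h1 : (∃ t : Int, 1 ≤ t ∧ t < n ∧ pvInner n t = 0) ↔
      (∃ t : Int, 1 ≤ t ∧ t < n ∧ ∃ j : ℕ, 2 * n = 2 * (j : Int) * t + (j : Int) * ((j : Int) - 1)) := by
    constructor
    · rintro ⟨t, h1, h2, h3⟩; exact ⟨t, h1, h2, (pvInner_zero_iff n t (by omega)).mp h3⟩
    · rintro ⟨t, h1, h2, h3⟩; exact ⟨t, h1, h2, (pvInner_zero_iff n t (by omega)).mpr h3⟩
  rw [h1, exists_int_iff_nat, key_nat]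

-- B's value characterised
theorem portB_iff (n : Int) :
    isSumOfConsecutive_alt n = true ↔ (2 < n.toNat ∧ ¬ ∃ k : ℕ, n.toNat = 2 ^ k) := by
  unfold isSumOfConsecutive_alt
  by_cases hn : 2 < n
  · have h3 : 2 < n.toNat := by omega
    have hland : Int.land n (n - 1) = ((n.toNat &&& (n.toNat - 1) : ℕ) : Int) := by
      conv_lhs => rw [show n = ((n.toNat : ℕ) : Int) by omega,
        show ((n.toNat : ℕ) : Int) - 1 = ((n.toNat - 1 : ℕ) : Int) by omega]
      rfl
    rw [hland]
    simp only [hn, decide_true, Bool.true_and, bne_iff_ne, ne_eq, Int.natCast_eq_zero]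
    rw [land_pred_eq_zero_iff n.toNat (by omega)]
    exact (and_iff_right h3).symm
  · simp only [Bool.and_eq_true, decide_eq_true_eq, bne_iff_ne]
    constructor
    · rintro ⟨h, _⟩; exact absurd h hn
    · rintro ⟨h3, _⟩; exact absurd h3 (by omega)

-- ===== VERDICT (by name: the statement is the Claim_ definition above) =====
theorem isSumOfConsecutive_spec : Claim_equal_isSumOfConsecutive := by
  intro n _
  unfold Spec_isSumOfConsecutive
  rw [Bool.eq_iff_iff, portA_iff, portB_iff]
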